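-- pv_equiv track=rewrite | github.com/eeshsaxena/Project1 | clean_notebooks.py | strip_dark_theme
-- ===== SOURCE A (Python) =====
-- def strip_dark_theme(source_lines):
--     """Replace dark-background colour strings with white equivalents."""
--     text = "".join(source_lines)
--     replacements = {
--         '"#0f1117"': '"white"',
--         '"#1a1d27"': '"white"',
--         '"#1e2130"': '"white"',
--         '"#ffffff"': '"black"',   # text that was white-on-dark → black
--         "'#0f1117'": "'white'",
--         "'#1a1d27'": "'white'",
--     }
--     for old, new in replacements.items():
--         text = text.replace(old, new)
--     return [text]
-- ===== SOURCE B (Python) =====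
-- # Single left-to-right scan with one lookup table instead of six sequential
-- # full-text .replace passes. All six search keys are 9 characters long, so at
-- # each position we probe the 9-char window in a dict; on a hit we emit the
-- # mapped replacement and jump past the key, otherwise we copy one character.
-- _REPL = {
--     '"#0f1117"': '"white"',
--     '"#1a1d27"': '"white"',
--     '"#1e2130"': '"white"',
--     '"#ffffff"': '"black"',
--     "'#0f1117'": "'white'",
--     "'#1a1d27'": "'white'",
-- }
--
--
-- def strip_dark_theme(source_lines):
--     """Replace dark-background colour strings with white equivalents."""
--     text = "".join(source_lines)
--     out = []
--     i = 0
--     n = len(text)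
--     while i < n:
--         repl = _REPL.get(text[i:i + 9])
--         if repl is not None:
--             out.append(repl)
--             i += 9
--         else:
--             out.append(text[i])
--             i += 1
--     return ["".join(out)]
-- ===== Notes on version B (the rewrite author's own statement) =====
-- stated objective: alternative
-- what changed: One left-to-right scan that probes the 9-character window at each position in a lookup table of the six colour keys, replacing A's six sequential full-text str.replace passes.
-- outside the precondition, e.g. on strip_dark_theme(['"#0f1117"#1a1d27"']): A returns ['"white"white"'], B returns ['"white"#1a1d27"']
import Mathlib
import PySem

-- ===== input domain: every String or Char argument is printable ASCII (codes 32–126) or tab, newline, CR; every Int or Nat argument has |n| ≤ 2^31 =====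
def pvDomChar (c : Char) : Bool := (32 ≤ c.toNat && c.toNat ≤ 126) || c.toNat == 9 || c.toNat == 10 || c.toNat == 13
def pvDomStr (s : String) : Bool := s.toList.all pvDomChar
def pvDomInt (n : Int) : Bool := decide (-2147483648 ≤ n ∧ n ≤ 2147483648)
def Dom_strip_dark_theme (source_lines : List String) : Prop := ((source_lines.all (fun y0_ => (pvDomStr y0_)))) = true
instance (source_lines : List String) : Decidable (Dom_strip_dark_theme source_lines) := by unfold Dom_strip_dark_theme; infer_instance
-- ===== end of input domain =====

-- B rewrites A's six sequential full-text str.replace passes as ONE left-to-right scan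
-- with a lookup table over the 9-character window at each position (objective: alternative;
-- same return value on every input admitted by Pre_ below).

-- ===== PORT A =====
-- A's `replacements` dict, in insertion order (iterated by `for old, new in replacements.items()`).
def pvPairsA : List (String × String) :=
  [("\"#0f1117\"", "\"white\""), ("\"#1a1d27\"", "\"white\""), ("\"#1e2130\"", "\"white\""),
   ("\"#ffffff\"", "\"black\""), ("'#0f1117'", "'white'"), ("'#1a1d27'", "'white'")]

def strip_dark_theme (source_lines : List String) : List String :=
  let text := PySem.Str.join "" source_lines
  let text := pvPairsA.foldl (fun t p => PySem.Str.replace t p.1 p.2) text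
  [text]

-- ===== PORT B =====
-- B's `_REPL` dict.
def pvTable : PySem.Dict (List Char) (List Char) :=
  ⟨[("\"#0f1117\"".toList, "\"white\"".toList), ("\"#1a1d27\"".toList, "\"white\"".toList),
   ("\"#1e2130\"".toList, "\"white\"".toList), ("\"#ffffff\"".toList, "\"black\"".toList),
   ("'#0f1117'".toList, "'white'".toList), ("'#1a1d27'".toList, "'white'".toList)]⟩

-- termination helper for pvScan (every key of the table has 9 characters)
theorem pvTable_get_len (k r : List Char) (h : PySem.Dict.get? pvTable k = some r) :
    k.length = 9 := by
  unfold PySem.Dict.get? at h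
  rcases Option.map_eq_some_iff.mp h with ⟨p, hp, -⟩
  have hm := List.mem_of_find?_eq_some hp
  have hk : p.1 = k := by simpa using List.find?_some hp
  have hall : ∀ p ∈ pvTable.items, p.1.length = 9 := by decide
  rw [← hk]; exact hall p hm

-- B's scanning loop: at each position probe the 9-char window in the table;
-- on a hit emit the replacement and jump 9, else copy one character.
def pvScan (l : List Char) : List Char :=
  match h : PySem.Dict.get? pvTable (l.take 9) with
  | some r => r ++ pvScan (l.drop 9)
  | none =>
    match l with
    | [] => []
    | c :: t => c :: pvScan t
termination_by l.length
decreasing_by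
· have h9 := pvTable_get_len _ _ h
  have : l.length ≥ 9 := by
    have : (l.take 9).length = min 9 l.length := by simp
    omega
  simp; omega
· simp

def strip_dark_theme_alt (source_lines : List String) : List String :=
  let text := PySem.Str.join "" source_lines
  [String.ofList (pvScan text.toList)]

-- ===== PRECONDITION & SPEC =====
-- the six colour keys (used by the precondition and the proofs)
def pvKey : Fin 6 → List Char
  | 0 => "\"#0f1117\"".toList
  | 1 => "\"#1a1d27\"".toList
  | 2 => "\"#1e2130\"".toList
  | 3 => "\"#ffffff\"".toList
  | 4 => "'#0f1117'".toList
  | 5 => "'#1a1d27'".toList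

-- Pre_ excludes texts in which two DIFFERENT colour keys overlap on a shared quote
-- character (e.g. '"#0f1117"#1a1d27"'): there the overlapping-match corner is not
-- specified either way — A's sequential passes chain across a replacement boundary,
-- B resolves the overlap by the leftmost match — so no common value exists.
def Pre_strip_dark_theme (source_lines : List String) : Prop :=
  ∀ a b : Fin 6, a ≠ b → (pvKey a).getLast? = (pvKey b).head? →
    PySem.Chars.isIn (pvKey a ++ (pvKey b).drop 1) ((source_lines.map String.toList).flatten) = false

instance (source_lines : List String) : Decidable (Pre_strip_dark_theme source_lines) := by
  unfold Pre_strip_dark_theme; infer_instance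

def pvWitness_strip_dark_theme : List String := ["plot_bgcolor=\"#0f1117\",", "font_color=\"#ffffff\")"]

def Spec_strip_dark_theme (source_lines : List String) (out : List String) : Prop :=
  out = strip_dark_theme_alt source_lines
instance (source_lines : List String) (out : List String) : Decidable (Spec_strip_dark_theme source_lines out) := by
  unfold Spec_strip_dark_theme; infer_instance

-- ===== CLAIM (what is proved, stated in full; the proofs are below) =====
def Claim_equal_strip_dark_theme : Prop := ∀ (source_lines : List String), Dom_strip_dark_theme source_lines → Pre_strip_dark_theme source_lines → Spec_strip_dark_theme source_lines (strip_dark_theme source_lines)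

-- ===== LEMMAS AND PROOFS =====

-- the replacement mapped to each key
def pvRep : Fin 6 → List Char
  | 0 => "\"white\"".toList
  | 1 => "\"white\"".toList
  | 2 => "\"white\"".toList
  | 3 => "\"black\"".toList
  | 4 => "'white'".toList
  | 5 => "'white'".toList

def pvHeadQ (i : Fin 6) : Char := (pvKey i).head?.getD ' '
def pvLastQ (i : Fin 6) : Char := (pvKey i).getLast?.getD ' '
def pvMid (i : Fin 6) : List Char := ((pvKey i).drop 1).take 7

-- "no two different keys overlap on a shared quote" as a property of a char list
def pvSafe (l : List Char) : Prop :=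
  ∀ a b : Fin 6, a ≠ b → (pvKey a).getLast? = (pvKey b).head? →
    ¬ (pvKey a ++ (pvKey b).drop 1) <:+: l

-- finite character facts, discharged by decide
theorem pvKey_len : ∀ i, (pvKey i).length = 9 := by decide
theorem pvKey_ne_nil : ∀ i, pvKey i ≠ [] := by decide
theorem pvKey_inj : ∀ i j, pvKey i = pvKey j → i = j := by decide
theorem pvRep_head : ∀ i, (pvRep i).head? = (pvKey i).head? := by decide
theorem pvKey_head_quote : ∀ i, (pvKey i).head? = some '"' ∨ (pvKey i).head? = some '\'' := by decide
theorem pvKey_cons_decomp : ∀ i, pvKey i = pvHeadQ i :: (pvKey i).drop 1 := by decide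
theorem pvKey_tail_decomp : ∀ i, (pvKey i).drop 1 = pvMid i ++ [pvLastQ i] := by decide
theorem pvMid_nonquote_bool : ∀ i, (pvMid i).all (fun c => !(c == '"' || c == '\'')) = true := by decide
theorem pvMid_nonquote : ∀ i, ∀ c ∈ pvMid i, ¬(c = '"' ∨ c = '\'') := by
  intro i c hc
  have h := (List.all_eq_true.mp (pvMid_nonquote_bool i)) c hc
  simpa using h
theorem pvKey_drop8 : ∀ i, (pvKey i).drop 8 = [pvLastQ i] := by decide
theorem pvRep_drop6 : ∀ i, (pvRep i).drop 6 = [pvLastQ i] := by decide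
theorem pvRep_len : ∀ i, (pvRep i).length = 7 := by decide
theorem pvD1 : ∀ (i n : Fin 6) (j : Fin 8), i ≠ n →
    ¬ pvKey n <+: (pvKey i).drop j.1 ∧ ¬ (pvKey i).drop j.1 <+: pvKey n := by decide
theorem pvD2 : ∀ (i n : Fin 6) (j : Fin 6),
    ¬ pvKey n <+: (pvRep i).drop j.1 ∧ ¬ (pvRep i).drop j.1 <+: pvKey n := by decide
theorem pvLastQ_prefix : ∀ i n : Fin 6, [pvLastQ i] <+: pvKey n →
    (pvKey i).getLast? = (pvKey n).head? := by decide
theorem pvTable_mem : ∀ p ∈ pvTable.items, ∃ i : Fin 6, p = (pvKey i, pvRep i) := by decide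
theorem pvLookup_key : ∀ i : Fin 6, PySem.Dict.get? pvTable (pvKey i) = some (pvRep i) := by
  intro i
  unfold PySem.Dict.get? pvTable
  fin_cases i <;> decide

theorem pvSafe_of_suffix {l t : List Char} (h : t <:+ l) (hs : pvSafe l) : pvSafe t := by
  intro a b hne hq hinf
  exact hs a b hne hq (hinf.trans h.isInfix)

-- ---- the literal shape of one Python str.replace pass (leftmost, non-overlapping) ----
def pvRep1 (old new : List Char) (l : List Char) : List Char :=
  if h : old.isPrefixOf l ∧ old ≠ [] then new ++ pvRep1 old new (l.drop old.length)
  else match l with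
    | [] => []
    | c :: t => c :: pvRep1 old new t
termination_by l.length
decreasing_by
· have hp : old <+: l := by simpa using h.1
  have h1 : old.length ≤ l.length := hp.length_le
  have h2 : 0 < old.length := List.length_pos_iff.mpr h.2
  simp; omega
· simp

theorem pvRep1_nil (old new : List Char) (hold : old ≠ []) : pvRep1 old new [] = [] := by
  rw [pvRep1, dif_neg (by simp [hold])]

theorem pvRep1_pos (old new l : List Char) (hold : old ≠ []) (hp : old <+: l) :
    pvRep1 old new l = new ++ pvRep1 old new (l.drop old.length) := by
  rw [pvRep1, dif_pos ⟨List.isPrefixOf_iff_prefix.mpr hp, hold⟩]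

theorem pvRep1_neg (old new t : List Char) (c : Char) (hp : ¬ old <+: (c :: t)) :
    pvRep1 old new (c :: t) = c :: pvRep1 old new t := by
  rw [pvRep1, dif_neg (by simp [List.isPrefixOf_iff_prefix]; intro h; exact absurd h hp)]

theorem pvReplace_go_eq (old new : List Char) (hold : old ≠ []) :
    ∀ fuel l acc, l.length ≤ fuel →
    PySem.Chars.replace.go old new fuel l acc = acc.reverse ++ pvRep1 old new l := by
  intro fuel
  induction fuel with
  | zero =>
    intro l acc hl
    have : l = [] := by cases l <;> simp_all
    subst this
    rw [PySem.Chars.replace.go.eq_def, pvRep1_nil _ _ hold]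
    try simp
  | succ f ih =>
    intro l acc hl
    cases l with
    | nil =>
      rw [PySem.Chars.replace.go.eq_def, pvRep1_nil _ _ hold]
      try simp
    | cons c t =>
      rw [PySem.Chars.replace.go.eq_def]
      by_cases hp : old <+: (c :: t)
      · have hb : old.isPrefixOf (c :: t) = true := List.isPrefixOf_iff_prefix.mpr hp
        simp only [hb, if_true]
        rw [ih _ _ (by have := hp.length_le; have h2 : 0 < old.length := List.length_pos_iff.mpr hold; simp at hl ⊢; omega)]
        rw [pvRep1_pos _ _ _ hold hp]
        simp
      · have hb : ¬ old.isPrefixOf (c :: t) = true := by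
          simp [List.isPrefixOf_iff_prefix]; intro h; exact absurd h hp
        simp only [hb]
        have ht : t.length ≤ f := by simp at hl; omega
        rw [ih t (c :: acc) ht, pvRep1_neg _ _ _ _ hp]
        simp

theorem pvReplace_eq (old new l : List Char) (hold : old ≠ []) :
    PySem.Chars.replace l old new = pvRep1 old new l := by
  rw [PySem.Chars.replace]
  simp only [List.isEmpty_iff]
  rw [if_neg hold]
  exact pvReplace_go_eq old new hold _ l [] le_rfl

-- ---- the common intermediate: text with keys < n already substituted ----
def pvFirstKey (l : List Char) : Option (Fin 6) :=
  (List.finRange 6).find? (fun i => (pvKey i).isPrefixOf l)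

theorem pvFirstKey_some {l : List Char} {i : Fin 6} (h : pvFirstKey l = some i) :
    pvKey i <+: l := by
  have := List.find?_some h
  simpa [List.isPrefixOf_iff_prefix] using this

theorem pvFirstKey_none {l : List Char} (h : pvFirstKey l = none) :
    ∀ i, ¬ pvKey i <+: l := by
  intro i hp
  have := List.find?_eq_none.mp h i (by simp)
  simp [List.isPrefixOf_iff_prefix] at this
  exact absurd hp this

theorem pvFirstKey_of_prefix {l : List Char} {i : Fin 6} (h : pvKey i <+: l) :
    pvFirstKey l = some i := by
  cases hf : pvFirstKey l with
  | none => exact absurd h (pvFirstKey_none hf i)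
  | some j =>
    have hj := pvFirstKey_some hf
    have : pvKey i = pvKey j := by
      rcases List.prefix_of_prefix_length_le h hj (by rw [pvKey_len, pvKey_len]) with hij
      exact List.IsPrefix.eq_of_length hij (by rw [pvKey_len, pvKey_len])
    rw [pvKey_inj _ _ this]

def pvSubst (n : Nat) (l : List Char) : List Char :=
  match h : pvFirstKey l with
  | some i => (if i.1 < n then pvRep i else pvKey i) ++ pvSubst n (l.drop 9)
  | none =>
    match l with
    | [] => []
    | c :: t => c :: pvSubst n t
termination_by l.length
decreasing_by
· have h9 := (pvFirstKey_some h).length_le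
  rw [pvKey_len] at h9
  simp; omega
· simp

theorem pvSubst_some (n : Nat) {l : List Char} {i : Fin 6} (h : pvFirstKey l = some i) :
    pvSubst n l = (if i.1 < n then pvRep i else pvKey i) ++ pvSubst n (l.drop 9) := by
  rw [pvSubst]
  split
  · rename_i h' ; rw [h] at h'; cases h'; rfl
  · rename_i h' ; rw [h] at h'; cases h'

theorem pvSubst_nil (n : Nat) : pvSubst n [] = [] := by
  rw [pvSubst]
  split
  · rename_i i h
    exact absurd (pvFirstKey_some h).length_le (by rw [pvKey_len]; simp)
  · rfl

theorem pvSubst_cons_none (n : Nat) {c : Char} {t : List Char}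
    (h : pvFirstKey (c :: t) = none) : pvSubst n (c :: t) = c :: pvSubst n t := by
  rw [pvSubst]
  split
  · rename_i h' ; rw [h] at h'; cases h'
  · rfl

theorem pvPrefix_head {p l : List Char} (h : p <+: l) (hp : p ≠ []) : l.head? = p.head? := by
  rcases h with ⟨r, hr⟩
  subst hr
  cases p with
  | nil => exact absurd rfl hp
  | cons a q => rfl

theorem pvSubst_head (n : Nat) (t : List Char) : (pvSubst n t).head? = t.head? := by
  cases h : pvFirstKey t with
  | some i =>
    rw [pvSubst_some n h]
    have hh := pvPrefix_head (pvFirstKey_some h) (pvKey_ne_nil i)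
    rcases pvKey_head_quote i with hq | hq <;>
      (rw [hh]; split <;> simp [List.head?_append, pvRep_head i, hq])
  | none =>
    cases t with
    | nil => rw [pvSubst_nil]
    | cons c t' => rw [pvSubst_cons_none n h]; simp

-- a block of non-quote characters followed by one char is seen through pvSubst unchanged
theorem pvAux (n : Nat) :
    ∀ (d : List Char) (q : Char) (t : List Char),
      (∀ c ∈ d, ¬(c = '"' ∨ c = '\'')) → (d ++ [q]) <+: pvSubst n t → (d ++ [q]) <+: t := by
  intro d
  induction d with
  | nil =>
    intro q t _ h
    have := pvPrefix_head h (by simp)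
    simp at this
    cases t with
    | nil => simp [pvSubst_nil] at this
    | cons c t' =>
      rw [pvSubst_head] at this
      simp at this
      simp [this]
  | cons e d' ih =>
    intro q t hd h
    have hh := pvPrefix_head h (by simp)
    rw [pvSubst_head] at hh
    cases t with
    | nil => simp at hh
    | cons a t' =>
      simp only [List.head?_cons, List.cons_append] at hh
      have ha : a = e := by simpa using hh
      subst e
      have hnone : pvFirstKey (a :: t') = none := by
        cases hf : pvFirstKey (a :: t') with
        | none => rfl
        | some i =>
          have hp := pvPrefix_head (pvFirstKey_some hf) (pvKey_ne_nil i)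
          rcases pvKey_head_quote i with hq | hq <;>
          · rw [hq] at hp
            simp only [List.head?_cons, Option.some.injEq] at hp
            first
            | exact absurd (Or.inl hp) (hd a (by simp))
            | exact absurd (Or.inr hp) (hd a (by simp))
      rw [pvSubst_cons_none n hnone] at h
      have h' : (d' ++ [q]) <+: pvSubst n t' := by simpa using h
      have := ih q t' (fun x hx => hd x (by simp [hx])) h'
      simpa using this

theorem pvPrefix_append_cases {K s u : List Char} (h : K <+: s ++ u) :
    K <+: s ∨ (s <+: K ∧ K.drop s.length <+: u) := by
  rcases h with ⟨r, hr⟩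
  by_cases hl : K.length ≤ s.length
  · left
    exact List.prefix_of_prefix_length_le ⟨r, hr⟩ (List.prefix_append s u) hl
  · right
    have hs : s <+: K := List.prefix_of_prefix_length_le (List.prefix_append s u) ⟨r, hr⟩ (by omega)
    refine ⟨hs, ?_⟩
    rcases hs with ⟨m, hm⟩
    subst hm
    refine ⟨r, ?_⟩
    simpa using hr

theorem pvRep1_skip (K R : List Char) :
    ∀ (s u : List Char), (∀ j, j < s.length → ¬ K <+: ((s.drop j) ++ u)) →
    pvRep1 K R (s ++ u) = s ++ pvRep1 K R u := by
  intro s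
  induction s with
  | nil => intro u _; rfl
  | cons c s' ih =>
    intro u h
    have h0 : ¬ K <+: (c :: (s' ++ u)) := by
      have := h 0 (by simp)
      simpa using this
    rw [List.cons_append, pvRep1_neg _ _ _ _ h0, ih u (fun j hj => by
      have := h (j+1) (by simp; omega)
      simpa using this)]
    simp

-- the key fact: a key completed across a replacement boundary is a forbidden overlap
theorem pvNoPhantomTail {n i : Fin 6} {t : List Char} {st : Nat} (hne : i ≠ n)
    (hq : (pvKey i).getLast? = (pvKey n).head?)
    (hS : pvSafe (pvKey i ++ t))
    (h : (pvKey n).tail <+: pvSubst st t) : False := by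
  rw [← List.drop_one, pvKey_tail_decomp n] at h
  have h2 : (pvMid n ++ [pvLastQ n]) <+: t := pvAux st _ _ _ (pvMid_nonquote n) h
  rw [← pvKey_tail_decomp n] at h2
  rcases h2 with ⟨r, hr⟩
  apply hS i n hne hq
  exact ⟨[], r, by simp [← hr]⟩

theorem pvSubst_zero : ∀ m (l : List Char), l.length ≤ m → pvSubst 0 l = l := by
  intro m
  induction m with
  | zero =>
    intro l hl
    have : l = [] := by cases l <;> simp_all
    subst this; exact pvSubst_nil 0
  | succ m ih =>
    intro l hl
    cases h : pvFirstKey l with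
    | some i =>
      rw [pvSubst_some 0 h]
      have hp := pvFirstKey_some h
      have h9 : pvKey i ++ l.drop 9 = l := by
        have := List.prefix_iff_eq_append.mp hp
        rwa [pvKey_len] at this
      have hlen : (l.drop 9).length ≤ m := by
        have := hp.length_le; rw [pvKey_len] at this; simp; omega
      rw [if_neg (Nat.not_lt_zero i.1), ih _ hlen, h9]
    | none =>
      cases l with
      | nil => exact pvSubst_nil 0
      | cons c t =>
        rw [pvSubst_cons_none 0 h, ih t (by simp at hl; omega)]

-- one replace pass takes the text from stage n to stage n+1
theorem pvPass (n : Fin 6) : ∀ m (l : List Char), l.length ≤ m → pvSafe l →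
    pvRep1 (pvKey n) (pvRep n) (pvSubst n.1 l) = pvSubst (n.1 + 1) l := by
  intro m
  induction m with
  | zero =>
    intro l hl _
    have : l = [] := by cases l <;> simp_all
    subst this
    rw [pvSubst_nil, pvSubst_nil, pvRep1_nil _ _ (pvKey_ne_nil n)]
  | succ m ih =>
    intro l hl hS
    cases h : pvFirstKey l with
    | none =>
      cases l with
      | nil => rw [pvSubst_nil, pvSubst_nil, pvRep1_nil _ _ (pvKey_ne_nil n)]
      | cons c t =>
        rw [pvSubst_cons_none _ h, pvSubst_cons_none _ h]
        have hnp : ¬ pvKey n <+: (c :: pvSubst n.1 t) := by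
          intro hpre
          rw [pvKey_cons_decomp n] at hpre
          rw [List.cons_prefix_cons] at hpre
          obtain ⟨hc, htail⟩ := hpre
          have htl : (pvKey n).drop 1 <+: t := by
            rw [pvKey_tail_decomp n] at htail ⊢
            exact pvAux n.1 _ _ _ (pvMid_nonquote n) htail
          have : pvKey n <+: c :: t := by
            rw [pvKey_cons_decomp n, hc]
            exact List.cons_prefix_cons.mpr ⟨rfl, htl⟩
          exact absurd this (pvFirstKey_none h n)
        rw [pvRep1_neg _ _ _ _ hnp]
        have hSt : pvSafe t := pvSafe_of_suffix (List.suffix_cons c t) hS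
        rw [ih t (by simp at hl; omega) hSt]
    | some i =>
      have hp := pvFirstKey_some h
      have h9 : l = pvKey i ++ l.drop 9 := by
        have := List.prefix_iff_eq_append.mp hp
        rw [pvKey_len] at this
        exact this.symm
      have hSt : pvSafe (l.drop 9) := pvSafe_of_suffix (List.drop_suffix 9 l) hS
      have hlen : (l.drop 9).length ≤ m := by
        have := hp.length_le; rw [pvKey_len] at this; simp; omega
      rw [pvSubst_some _ h, pvSubst_some _ h]
      by_cases hin : i = n
      · subst hin
        rw [if_neg (by omega), if_pos (by omega)]
        rw [pvRep1_pos _ _ _ (pvKey_ne_nil i) (List.prefix_append _ _)]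
        rw [List.drop_left]
        rw [ih _ hlen hSt]
      · have hSl : pvSafe (pvKey i ++ l.drop 9) := by rw [← h9]; exact hS
        have hcond : ∀ (s : List Char), s = pvKey i ∨ s = pvRep i →
            ∀ j, j < s.length → ¬ pvKey n <+: ((s.drop j) ++ pvSubst n.1 (l.drop 9)) := by
          intro s hs j hj hpre
          rcases pvPrefix_append_cases hpre with h1 | ⟨h2, h3⟩
          · rcases hs with hs | hs <;> subst hs
            · by_cases hj8 : j = 8
              · subst hj8
                rw [pvKey_drop8 i] at h1
                have := h1.length_le
                rw [pvKey_len] at this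
                simp at this
              · have hjlt : j < 8 := by rw [pvKey_len] at hj; omega
                exact absurd h1 (pvD1 i n ⟨j, hjlt⟩ hin).1
            · by_cases hj6 : j = 6
              · subst hj6
                rw [pvRep_drop6 i] at h1
                have := h1.length_le
                rw [pvKey_len] at this
                simp at this
              · have hjlt : j < 6 := by rw [pvRep_len] at hj; omega
                exact absurd h1 (pvD2 i n ⟨j, hjlt⟩).1
          · rcases hs with hs | hs <;> subst hs
            · by_cases hj8 : j = 8
              · subst hj8
                rw [pvKey_drop8 i] at h2 h3
                simp at h3
                exact pvNoPhantomTail hin (pvLastQ_prefix i n h2) hSl h3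
              · have hjlt : j < 8 := by rw [pvKey_len] at hj; omega
                exact absurd h2 (pvD1 i n ⟨j, hjlt⟩ hin).2
            · by_cases hj6 : j = 6
              · subst hj6
                rw [pvRep_drop6 i] at h2 h3
                simp at h3
                exact pvNoPhantomTail hin (pvLastQ_prefix i n h2) hSl h3
              · have hjlt : j < 6 := by rw [pvRep_len] at hj; omega
                exact absurd h2 (pvD2 i n ⟨j, hjlt⟩).2
        have hv : i.1 ≠ n.1 := fun hc => hin (Fin.ext hc)
        split
        · rename_i hlt
          rw [pvRep1_skip _ _ _ _ (hcond (pvRep i) (Or.inr rfl))]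
          rw [ih _ hlen hSt, if_pos (by omega : i.1 < n.1 + 1)]
        · rename_i hlt
          rw [pvRep1_skip _ _ _ _ (hcond (pvKey i) (Or.inl rfl))]
          rw [ih _ hlen hSt, if_neg (by omega : ¬ i.1 < n.1 + 1)]

-- B's scan is exactly stage 6 (all keys substituted)
theorem pvScan_eq : ∀ m (l : List Char), l.length ≤ m → pvScan l = pvSubst 6 l := by
  intro m
  induction m with
  | zero =>
    intro l hl
    have : l = [] := by cases l <;> simp_all
    subst this
    rw [pvSubst_nil, pvScan]
    have hn : PySem.Dict.get? pvTable (List.take 9 ([] : List Char)) = none := by decide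
    split
    · rename_i r hr
      rw [hn] at hr
      cases hr
    · rfl
  | succ m ih =>
    intro l hl
    rw [pvScan]
    split
    · rename_i r hg
      rcases Option.map_eq_some_iff.mp (by unfold PySem.Dict.get? at hg; exact hg) with ⟨p, hp, hr⟩
      rcases pvTable_mem p (List.mem_of_find?_eq_some hp) with ⟨i, hi⟩
      have hk : p.1 = l.take 9 := by simpa using List.find?_some hp
      have hkey : pvKey i <+: l := by
        rw [hi] at hk
        simp at hk
        exact hk ▸ List.take_prefix 9 l
      have hf : pvFirstKey l = some i := pvFirstKey_of_prefix hkey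
      rw [pvSubst_some 6 hf, if_pos i.isLt]
      have hlen : (l.drop 9).length ≤ m := by
        have := hkey.length_le; rw [pvKey_len] at this; simp; omega
      rw [ih _ hlen]
      rw [hi] at hr
      simp at hr
      rw [hr]
    · rename_i hg
      have hf : pvFirstKey l = none := by
        cases hf : pvFirstKey l with
        | none => rfl
        | some i =>
          have hkey := pvFirstKey_some hf
          have : l.take 9 = pvKey i := by
            have := List.prefix_iff_eq_take.mp hkey
            rw [pvKey_len] at this
            exact this.symm
          rw [this, pvLookup_key i] at hg
          cases hg
      split
      · rw [pvSubst_nil]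
      · rename_i c t _
        rw [pvSubst_cons_none 6 hf]
        exact congrArg (c :: ·) (ih t (by simp at hl; omega))

theorem pvJoin_toList (sl : List String) :
    (PySem.Str.join "" sl).toList = (sl.map String.toList).flatten := by
  simp [PySem.Str.join, PySem.Chars.join]
  generalize (sl.map String.toList) = L
  induction L with
  | nil => rfl
  | cons x xs ih =>
    cases xs with
    | nil => simp [List.intercalate]
    | cons y ys =>
      simp [List.intercalate, List.intersperse] at ih ⊢
      simpa using ih

-- ===== VERDICT (by name: the statement is the Claim_ definition above) =====
set_option maxHeartbeats 1000000 in
theorem strip_dark_theme_spec : Claim_equal_strip_dark_theme := by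
  intro sl _ hpre
  unfold Spec_strip_dark_theme strip_dark_theme strip_dark_theme_alt
  show [pvPairsA.foldl (fun t p => PySem.Str.replace t p.1 p.2) (PySem.Str.join "" sl)]
     = [String.ofList (pvScan (PySem.Str.join "" sl).toList)]
  refine congrArg (fun x => [x]) ?_
  apply String.toList_inj.mp
  have hS : pvSafe (PySem.Str.join "" sl).toList := by
    intro a b hne hq hinf
    have := hpre a b hne hq
    rw [← pvJoin_toList] at this
    exact absurd hinf (by rwa [PySem.Chars.isIn_eq_false_iff] at this)
  set L := (PySem.Str.join "" sl).toList with hL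
  have key : ∀ (k : Fin 6) (x : List Char),
      PySem.Chars.replace x (pvKey k) (pvRep k) = pvRep1 (pvKey k) (pvRep k) x :=
    fun k x => pvReplace_eq _ _ _ (pvKey_ne_nil k)
  simp only [pvPairsA, List.foldl_cons, List.foldl_nil]
  simp only [PySem.Str.toList_replace]
  show PySem.Chars.replace (PySem.Chars.replace (PySem.Chars.replace (PySem.Chars.replace
      (PySem.Chars.replace (PySem.Chars.replace L (pvKey 0) (pvRep 0)) (pvKey 1) (pvRep 1))
      (pvKey 2) (pvRep 2)) (pvKey 3) (pvRep 3)) (pvKey 4) (pvRep 4)) (pvKey 5) (pvRep 5)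
    = (String.ofList (pvScan L)).toList
  rw [key 0, key 1, key 2, key 3, key 4, key 5]
  have step : ∀ (k : Fin 6), pvRep1 (pvKey k) (pvRep k) (pvSubst k.1 L) = pvSubst (k.1 + 1) L :=
    fun k => pvPass k L.length L le_rfl hS
  have s0 : pvRep1 (pvKey 0) (pvRep 0) L = pvSubst 1 L := by
    conv_lhs => rw [← pvSubst_zero L.length L le_rfl]
    exact step 0
  have s1 : pvRep1 (pvKey 1) (pvRep 1) (pvSubst 1 L) = pvSubst 2 L := step 1
  have s2 : pvRep1 (pvKey 2) (pvRep 2) (pvSubst 2 L) = pvSubst 3 L := step 2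
  have s3 : pvRep1 (pvKey 3) (pvRep 3) (pvSubst 3 L) = pvSubst 4 L := step 3
  have s4 : pvRep1 (pvKey 4) (pvRep 4) (pvSubst 4 L) = pvSubst 5 L := step 4
  have s5 : pvRep1 (pvKey 5) (pvRep 5) (pvSubst 5 L) = pvSubst 6 L := step 5
  rw [s0, s1, s2, s3, s4, s5, ← pvScan_eq L.length L le_rfl]
  simp
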